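-- pv_equiv track=rewrite | github.com/RasmusN/nanny | nanny.py | stuck
-- ===== SOURCE A (Python) =====
-- def stuck(lines, limit = 3):
--     """
--     Check if the miner is stuck on submitting solution.
--
--     returns True if the miner is stuck
--     """
--     c=0
--     for line in reversed(lines):
--             if "Solution found; Submitting ..." in line:
--                 c += 1
--             if "Worker stopping" in line:
--                 return False
--             if c > limit:
--                 return True
-- ===== SOURCE B (Python) =====
-- def stuck(lines, limit = 3):
--     """
--     Check if the miner is stuck on submitting solution.
--
--     returns True if the miner is stuck
--     """
--     last = -1
--     for i, line in enumerate(lines):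
--         if "Worker stopping" in line:
--             last = i
--     tail = lines[last + 1:]
--     count = sum(1 for line in tail if "Solution found; Submitting ..." in line)
--     if tail and count > limit:
--         return True
--     if last != -1:
--         return False
-- ===== Notes on version B (the rewrite author's own statement) =====
-- stated objective: alternative
-- what changed: Replaces A's single reverse scan with per-line early exits by a locate-then-count decomposition: a forward pass records the last 'Worker stopping' index, then the 'Solution found; Submitting ...' lines in the suffix after it are counted and the verdict is computed from that count.
import Mathlib
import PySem

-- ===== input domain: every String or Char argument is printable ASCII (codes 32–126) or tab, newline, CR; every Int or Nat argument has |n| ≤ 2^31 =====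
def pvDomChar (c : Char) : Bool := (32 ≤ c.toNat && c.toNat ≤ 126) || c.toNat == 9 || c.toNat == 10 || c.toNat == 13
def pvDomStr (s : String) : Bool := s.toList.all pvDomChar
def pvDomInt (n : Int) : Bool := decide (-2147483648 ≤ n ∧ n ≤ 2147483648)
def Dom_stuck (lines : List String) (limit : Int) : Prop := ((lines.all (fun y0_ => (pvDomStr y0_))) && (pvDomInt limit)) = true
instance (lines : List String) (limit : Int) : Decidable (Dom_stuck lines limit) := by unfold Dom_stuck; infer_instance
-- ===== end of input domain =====

-- B replaces A's single reverse scan with early exits by a locate-then-count decomposition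
-- (forward pass for the last "Worker stopping" index, then a count over the suffix); objective: alternative.

def solMark : String := "Solution found; Submitting ..."
def stopMark : String := "Worker stopping"

-- ===== PORT A =====
-- the for-loop over reversed(lines) with accumulator c and its three in-order checks
def stuckLoop (rest : List String) (c limit : Int) : Option Bool :=
  match rest with
  | [] => none
  | line :: rest =>
    let c := if PySem.Str.isIn solMark line then c + 1 else c
    if PySem.Str.isIn stopMark line then some false
    else if c > limit then some true
    else stuckLoop rest c limit

def stuck (lines : List String) (limit : Int) : Option Bool :=
  stuckLoop lines.reverse 0 limit

-- ===== PORT B =====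
def stuck_alt (lines : List String) (limit : Int) : Option Bool :=
  -- forward pass: highest index of a "Worker stopping" line, -1 if none
  let last := (PySem.List.enumerate lines).foldl
    (fun acc p => if PySem.Str.isIn stopMark p.2 then p.1 else acc) (-1 : Int)
  -- tail = lines[last + 1:]
  let tail := PySem.List.slice lines (some (last + 1)) none
  -- sum(1 for line in tail if solMark in line)
  let count := ((tail.filter (fun line => PySem.Str.isIn solMark line)).map
    (fun _ => (1 : Int))).sum
  if tail ≠ [] ∧ count > limit then some true
  else if last ≠ -1 then some false
  else none

-- ===== PRECONDITION & SPEC =====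
def Spec_stuck (lines : List String) (limit : Int) (out : Option Bool) : Prop := out = stuck_alt lines limit
instance (lines : List String) (limit : Int) (out : Option Bool) : Decidable (Spec_stuck lines limit out) := by unfold Spec_stuck; infer_instance

-- ===== CLAIM (what is proved, stated in full; the proofs are below) =====
def Claim_equal_stuck : Prop := ∀ (lines : List String) (limit : Int), Dom_stuck lines limit → Spec_stuck lines limit (stuck lines limit)

-- ===== LEMMAS AND PROOFS =====

-- closed form of A's reverse-scan loop: True iff the stretch before the first stop (in scan
-- order) is nonempty and its solution count pushes c over limit; False iff a stop line exists.
theorem stuckLoop_char (r : List String) (c limit : Int) :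
    stuckLoop r c limit =
      (let p := r.takeWhile (fun l => !PySem.Str.isIn stopMark l)
       if p ≠ [] ∧ c + (p.countP (fun l => PySem.Str.isIn solMark l) : Int) > limit then some true
       else if r.any (fun l => PySem.Str.isIn stopMark l) then some false
       else none) := by
  induction r generalizing c with
  | nil => rfl
  | cons line rest ih =>
    simp only [stuckLoop, List.takeWhile_cons, List.any_cons]
    by_cases hstop : PySem.Str.isIn stopMark line = true
    · simp only [hstop, Bool.not_true, if_true, Bool.false_eq_true, if_false, Bool.true_or,
        ne_eq, not_true_eq_false, false_and, if_false]
    · simp only [hstop, Bool.not_false, if_true, Bool.false_eq_true, if_false,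
        Bool.false_or, List.countP_cons, ne_eq, reduceCtorEq, not_false_eq_true, true_and]
      set p' := rest.takeWhile (fun l => !PySem.Str.isIn stopMark l) with hp'
      set c' := if PySem.Str.isIn solMark line then c + 1 else c with hc'
      have hcnt' : (0 : Int) ≤ (p'.countP (fun l => PySem.Str.isIn solMark l) : Int) := by positivity
      have hsum : c + ((p'.countP (fun l => PySem.Str.isIn solMark l)
          + if PySem.Str.isIn solMark line then 1 else 0 : Nat) : Int)
          = c' + (p'.countP (fun l => PySem.Str.isIn solMark l) : Int) := by
        rw [hc']
        by_cases hsol : PySem.Str.isIn solMark line = true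
        · rw [if_pos hsol, if_pos hsol]; push_cast; ring
        · rw [if_neg hsol, if_neg hsol]; push_cast; ring
      by_cases htrig : c' > limit
      · rw [if_pos htrig, if_pos (by rw [hsum]; omega)]
      · rw [if_neg htrig, ih c']
        simp only [hp']
        have hiff : (p' ≠ [] ∧ c' + (p'.countP (fun l => PySem.Str.isIn solMark l) : Int) > limit)
            ↔ (c + ((p'.countP (fun l => PySem.Str.isIn solMark l)
               + if PySem.Str.isIn solMark line then 1 else 0 : Nat) : Int) > limit) := by
          rw [hsum]
          constructor
          · exact fun h => h.2
          · intro h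
            refine ⟨fun hnil => ?_, h⟩
            rw [hnil] at h
            simp at h
            omega
        rw [if_congr hiff rfl rfl]

def lastIdx (lines : List String) : Int :=
  (PySem.List.enumerate lines).foldl
    (fun acc p => if PySem.Str.isIn stopMark p.2 then p.1 else acc) (-1 : Int)

theorem lastIdx_snoc (xs : List String) (x : String) :
    lastIdx (xs ++ [x]) = if PySem.Str.isIn stopMark x then (xs.length : Int) else lastIdx xs := by
  unfold lastIdx
  rw [PySem.List.enumerate_append, List.foldl_append]
  simp [PySem.List.enumerate]

-- B's forward pass: bounds, the "no stop line" test, and the tail it selects.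
theorem lastIdx_facts (xs : List String) :
    (-1 ≤ lastIdx xs ∧ lastIdx xs < xs.length) ∧
    (lastIdx xs = -1 ↔ ¬ xs.any (fun l => PySem.Str.isIn stopMark l)) ∧
    xs.drop (lastIdx xs + 1).toNat
      = (xs.reverse.takeWhile (fun l => !PySem.Str.isIn stopMark l)).reverse := by
  induction xs using List.reverseRecOn with
  | nil => simp [lastIdx, PySem.List.enumerate]
  | append_singleton xs x ih =>
    obtain ⟨⟨hlo, hhi⟩, hnone, hdrop⟩ := ih
    rw [lastIdx_snoc]
    have hlen : (xs ++ [x]).length = xs.length + 1 := by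
      simp only [List.length_append, List.length_cons, List.length_nil]
    by_cases hstop : PySem.Str.isIn stopMark x = true
    · rw [if_pos hstop]
      have hany : ((xs ++ [x]).any fun l => PySem.Str.isIn stopMark l) = true := by
        rw [List.any_append]
        simp only [List.any_cons, List.any_nil, hstop, Bool.or_false, Bool.or_true]
      refine ⟨⟨by omega, by rw [hlen]; push_cast; omega⟩,
        ⟨fun h => absurd h (by omega), fun h => absurd hany h⟩, ?_⟩
      rw [show ((xs.length : Int) + 1).toNat = xs.length + 1 by omega]
      rw [List.drop_eq_nil_of_le (by omega)]
      rw [List.reverse_append, List.reverse_singleton, List.singleton_append,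
        List.takeWhile_cons]
      simp only [hstop, Bool.not_true, Bool.false_eq_true, if_false, List.reverse_nil]
    · rw [if_neg hstop]
      have hany2 : ((xs ++ [x]).any fun l => PySem.Str.isIn stopMark l)
          = (xs.any fun l => PySem.Str.isIn stopMark l) := by
        rw [List.any_append]
        simp only [List.any_cons, List.any_nil, Bool.or_false,
          Bool.eq_false_iff.mpr hstop]
      refine ⟨⟨hlo, by rw [hlen]; push_cast; omega⟩, by rw [hany2]; exact hnone, ?_⟩
      have hle : (lastIdx xs + 1).toNat ≤ xs.length := by omega
      rw [List.drop_append_of_le_length hle, hdrop]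
      rw [List.reverse_append, List.reverse_singleton, List.singleton_append,
        List.takeWhile_cons]
      simp only [Bool.eq_false_iff.mpr hstop, Bool.not_false, if_true, List.reverse_cons]

theorem sum_ones_filter (ys : List String) (p : String → Bool) :
    ((ys.filter p).map (fun _ => (1 : Int))).sum = (ys.countP p : Int) := by
  rw [PySem.List.sum_map_const_int, List.countP_eq_length_filter]
  ring

-- ===== VERDICT (by name: the statement is the Claim_ definition above) =====
theorem stuck_spec : Claim_equal_stuck := by
  intro lines limit _
  unfold Spec_stuck stuck stuck_alt
  obtain ⟨⟨hlo, hhi⟩, hnone, hdrop⟩ := lastIdx_facts lines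
  rw [stuckLoop_char]
  simp only
  rw [show (PySem.List.enumerate lines).foldl
        (fun acc p => if PySem.Str.isIn stopMark p.2 then p.1 else acc) (-1 : Int)
      = lastIdx lines from rfl]
  rw [PySem.List.slice_from lines (by omega), hdrop, sum_ones_filter]
  set p := lines.reverse.takeWhile (fun l => !PySem.Str.isIn stopMark l) with hp
  have hcnt : p.reverse.countP (fun l => PySem.Str.isIn solMark l)
      = p.countP (fun l => PySem.Str.isIn solMark l) := List.countP_reverse ..
  have hne : (p.reverse ≠ [] ↔ p ≠ []) := by simp
  have hany : lines.any (fun l => PySem.Str.isIn stopMark l)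
      = lines.reverse.any (fun l => PySem.Str.isIn stopMark l) := by simp
  by_cases h1 : p ≠ [] ∧ (0 : Int) + (p.countP (fun l => PySem.Str.isIn solMark l) : Int) > limit
  · rw [if_pos h1, if_pos ⟨hne.mpr h1.1, by rw [hcnt]; omega⟩]
  · rw [if_neg h1]
    have hB : ¬(p.reverse ≠ [] ∧
        ((p.reverse.countP (fun line => PySem.Str.isIn solMark line) : Nat) : Int) > limit) :=
      fun h => h1 ⟨hne.mp h.1, by have h2 := h.2; rw [hcnt] at h2; omega⟩
    rw [if_neg hB, ← hany]
    by_cases h2 : lines.any (fun l => PySem.Str.isIn stopMark l) = true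
    · rw [if_pos h2, if_pos (fun he => (hnone.mp he) h2)]
    · rw [if_neg h2, if_neg (fun hne' => hne' (hnone.mpr h2))]
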